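-- pv_equiv track=rewrite | github.com/CogStack/OpenGPT | opengpt/dataset_utils.py | pack_examples
-- ===== SOURCE A (Python) =====
-- def pack_examples(examples, block_size, packing_type='partial'):
--     r''' Used with a prepared HF dataset, will pack/group examples. Use with care, can mess up many things
--     if the input is not formated properly (requires the <|eod|> token).
--
--     packing_type: partial/full/no
--     '''
--     # Concatenate all texts.
--     if packing_type == 'partial':
--         result = {k:[] for k in examples.keys()}
--         _key = list(examples.keys())[0] # Take whichever key
--         new_example = {k:[] for k in examples.keys()}
--
--         for ind in range(len(examples[_key])):
--             # Trim long sequences to block_size, this is required for partial packing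
--             example = {k:v[ind][0:block_size] for k,v in examples.items()}
--             if len(new_example[_key]) + len(example[_key]) > block_size:
--                 result = {k:result[k] + [v] for k,v in new_example.items()}
--                 new_example = example
--             else:
--                 new_example = {k:new_example[k] + v for k,v in example.items()}
--         #  Add the last example if there is something to add
--         if len(new_example[_key]) > 0:
--             result = {k:result[k] + [v] for k,v in new_example.items()}
--     elif packing_type == 'full':
--         # Full packing
--         concatenated_examples = {k: sum(examples[k], []) for k in examples.keys()}
--         total_length = len(concatenated_examples[list(examples.keys())[0]])
--         total_length = (total_length // block_size) * block_size
--         # Split by chunks of max_len.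
--         result = {
--             k: [t[i : i + block_size] for i in range(0, total_length, block_size)]
--             for k, t in concatenated_examples.items()
--         }
--     else:
--         # Do nothing
--         result = examples
--     return result
-- ===== SOURCE B (Python) =====
-- def pack_examples(examples, block_size, packing_type='partial'):
--     if packing_type == 'partial':
--         _key = list(examples.keys())[0]
--         prim = examples[_key]
--         # pass 1: compute the groups of row indices (greedy cut points over
--         # the trimmed lengths of the primary key)
--         lens = [len(row[0:block_size]) for row in prim]
--         groups = []
--         cur, cur_len = [], 0
--         for i, l in enumerate(lens):
--             if cur_len + l > block_size:
--                 groups.append(cur)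
--                 cur, cur_len = [i], l
--             else:
--                 cur.append(i)
--                 cur_len += l
--         if cur_len > 0:
--             groups.append(cur)
--         # pass 2: assemble one packed chunk per group per key
--         return {k: [[tok for i in g for tok in v[i][0:block_size]] for g in groups]
--                 for k, v in examples.items()}
--     elif packing_type == 'full':
--         _key = list(examples.keys())[0]
--         nchunks = len(sum(examples[_key], [])) // block_size
--         return {k: [sum(v, [])[j * block_size:(j + 1) * block_size]
--                     for j in range(nchunks)]
--                 for k, v in examples.items()}
--     else:
--         return examples
-- ===== Notes on version B (the rewrite author's own statement) =====
-- stated objective: alternative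
-- what changed: Partial packing is split into two visible passes - a greedy fold over the trimmed primary-key lengths that produces a table of index groups, then a per-key assembly concatenating each group's trimmed rows - instead of A's interleaved accumulate-and-flush dict loop; full packing derives a chunk count (len // block_size) and slices [j*bs:(j+1)*bs] instead of A's rounded total_length stepped range.
import Mathlib
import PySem

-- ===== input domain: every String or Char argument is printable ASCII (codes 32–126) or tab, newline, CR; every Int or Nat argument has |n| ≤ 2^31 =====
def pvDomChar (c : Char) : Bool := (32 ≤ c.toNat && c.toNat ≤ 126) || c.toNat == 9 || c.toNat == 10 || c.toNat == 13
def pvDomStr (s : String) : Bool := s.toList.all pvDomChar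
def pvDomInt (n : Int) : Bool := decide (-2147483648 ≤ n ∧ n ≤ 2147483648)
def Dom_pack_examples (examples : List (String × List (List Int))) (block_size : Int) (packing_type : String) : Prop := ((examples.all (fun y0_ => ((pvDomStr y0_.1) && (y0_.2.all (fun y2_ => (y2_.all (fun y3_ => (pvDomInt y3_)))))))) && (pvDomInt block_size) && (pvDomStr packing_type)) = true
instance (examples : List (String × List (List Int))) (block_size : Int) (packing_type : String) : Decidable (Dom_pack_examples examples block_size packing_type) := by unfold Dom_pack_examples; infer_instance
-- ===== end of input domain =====

-- B separates partial packing into two passes (greedy index grouping, then per-key assembly)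
-- and replaces full packing's total_length range by a chunk-count range; objective: alternative decomposition, same cost.


-- Python dict lookup d[k] on an insertion-ordered association list (first match; default only
-- reachable on inputs excluded by Pre_, where the Python raises KeyError/IndexError).
def pvLook {β : Type} (d : List (String × β)) (k : String) (dflt : β) : β :=
  (List.lookup k d).getD dflt

-- ===== PORT A =====
def pack_examples (examples : List (String × List (List Int))) (block_size : Int) (packing_type : String) : List (String × List (List Int)) :=
  if packing_type = "partial" then
    let result0 : List (String × List (List Int)) := examples.map (fun kv => (kv.1, []))
    let _key : String := (examples.map Prod.fst).headD ""
    let new0 : List (String × List Int) := examples.map (fun kv => (kv.1, []))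
    let st := (PySem.List.pyRange 0 ((pvLook examples _key []).length : Int) 1).foldl
      (fun (st : List (String × List (List Int)) × List (String × List Int)) ind =>
        let ex := examples.map (fun kv => (kv.1, PySem.List.slice (PySem.List.pyGetD kv.2 ind []) (some 0) (some block_size)))
        if ((pvLook st.2 _key []).length : Int) + ((pvLook ex _key []).length : Int) > block_size then
          (st.2.map (fun kv => (kv.1, pvLook st.1 kv.1 [] ++ [kv.2])), ex)
        else
          (st.1, ex.map (fun kv => (kv.1, pvLook st.2 kv.1 [] ++ kv.2))))
      (result0, new0)
    if ((pvLook st.2 _key []).length : Int) > 0 then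
      st.2.map (fun kv => (kv.1, pvLook st.1 kv.1 [] ++ [kv.2]))
    else st.1
  else if packing_type = "full" then
    let concatenated := (examples.map Prod.fst).map (fun k => (k, (pvLook examples k []).foldl (· ++ ·) []))
    let _key : String := (examples.map Prod.fst).headD ""
    let total_length0 : Int := ((pvLook concatenated _key []).length : Int)
    let total_length : Int := (PySem.Int.floordiv total_length0 block_size) * block_size
    concatenated.map (fun kv => (kv.1, (PySem.List.pyRange 0 total_length block_size).map
      (fun i => PySem.List.slice kv.2 (some i) (some (i + block_size)))))
  else
    examples

-- ===== PORT B =====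
def pack_examples_alt (examples : List (String × List (List Int))) (block_size : Int) (packing_type : String) : List (String × List (List Int)) :=
  if packing_type = "partial" then
    let _key : String := (examples.map Prod.fst).headD ""
    let prim := pvLook examples _key []
    -- pass 1: greedy cut points over trimmed primary-key lengths
    let lens : List Int := prim.map (fun row => ((PySem.List.slice row (some 0) (some block_size)).length : Int))
    let st := (PySem.List.enumerate lens).foldl
      (fun (st : List (List Int) × List Int × Int) il =>
        if st.2.2 + il.2 > block_size then (st.1 ++ [st.2.1], [il.1], il.2)
        else (st.1, st.2.1 ++ [il.1], st.2.2 + il.2))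
      ([], [], 0)
    let groups := if st.2.2 > 0 then st.1 ++ [st.2.1] else st.1
    -- pass 2: assemble one packed chunk per group per key
    examples.map (fun kv => (kv.1, groups.map (fun g =>
      g.flatMap (fun i => PySem.List.slice (PySem.List.pyGetD kv.2 i []) (some 0) (some block_size)))))
  else if packing_type = "full" then
    let _key : String := (examples.map Prod.fst).headD ""
    let nchunks : Int := PySem.Int.floordiv (((pvLook examples _key []).foldl (· ++ ·) []).length : Int) block_size
    examples.map (fun kv => (kv.1, (PySem.List.pyRange 0 nchunks 1).map
      (fun j => PySem.List.slice (kv.2.foldl (· ++ ·) []) (some (j * block_size)) (some ((j + 1) * block_size)))))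
  else
    examples

-- ===== PRECONDITION & SPEC =====
-- Pre_ excludes: duplicate keys (cannot arise from a Python dict, whose keys are unique);
-- empty dicts for 'partial'/'full' (A raises IndexError on list(examples.keys())[0]);
-- 'partial' inputs where some value list is shorter than the first key's (A raises IndexError on v[ind]);
-- and block_size = 0 for 'full' (A raises ValueError: range() arg 3 must not be zero).
def Pre_pack_examples (examples : List (String × List (List Int))) (block_size : Int) (packing_type : String) : Prop :=
  (examples.map Prod.fst).Nodup ∧
  ((packing_type = "partial" ∨ packing_type = "full") → examples ≠ []) ∧
  (packing_type = "partial" → ∀ kv ∈ examples, (examples.headD ("", [])).2.length ≤ kv.2.length) ∧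
  (packing_type = "full" → block_size ≠ 0)
instance (examples : List (String × List (List Int))) (block_size : Int) (packing_type : String) : Decidable (Pre_pack_examples examples block_size packing_type) := by unfold Pre_pack_examples; infer_instance

def pvWitness_pack_examples : (List (String × List (List Int))) × Int × String :=
  ([("a", [[1, 2], [3]]), ("b", [[7], [8]])], 2, "partial")

def Spec_pack_examples (examples : List (String × List (List Int))) (block_size : Int) (packing_type : String) (out : List (String × List (List Int))) : Prop := out = pack_examples_alt examples block_size packing_type
instance (examples : List (String × List (List Int))) (block_size : Int) (packing_type : String) (out : List (String × List (List Int))) : Decidable (Spec_pack_examples examples block_size packing_type out) := by unfold Spec_pack_examples; infer_instance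

-- ===== CLAIM (what is proved, stated in full; the proofs are below) =====
def Claim_equal_pack_examples : Prop := ∀ (examples : List (String × List (List Int))) (block_size : Int) (packing_type : String), Dom_pack_examples examples block_size packing_type → Pre_pack_examples examples block_size packing_type → Spec_pack_examples examples block_size packing_type (pack_examples examples block_size packing_type)

-- ===== LEMMAS AND PROOFS =====

-- proof-only abbreviations
def pvTrim (bs : Int) (row : List Int) : List Int := PySem.List.slice row (some 0) (some bs)
def pvChunk (bs : Int) (v : List (List Int)) (g : List Int) : List Int :=
  g.flatMap (fun i => pvTrim bs (PySem.List.pyGetD v i []))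
-- the common greedy grouping step both loops follow
def pvStep (bs : Int) (v0 : List (List Int)) (st : List (List Int) × List Int) (i : Int) : List (List Int) × List Int :=
  if ((pvChunk bs v0 st.2).length : Int) + ((pvTrim bs (PySem.List.pyGetD v0 i [])).length : Int) > bs
  then (st.1 ++ [st.2], [i]) else (st.1, st.2 ++ [i])

theorem pvLook_cons_self {β : Type} (k : String) (v : β) (rest : List (String × β)) (d : β) :
    pvLook ((k, v) :: rest) k d = v := by
  simp [pvLook, List.lookup]

theorem pvLook_of_mem {β : Type} (l : List (String × β)) (h : (l.map Prod.fst).Nodup)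
    (kv : String × β) (hm : kv ∈ l) (d : β) : pvLook l kv.1 d = kv.2 := by
  induction l with
  | nil => cases hm
  | cons x t ih =>
    rcases List.mem_cons.1 hm with h1 | h1
    · subst h1; simp [pvLook, List.lookup]
    · have hne : kv.1 ≠ x.1 := by
        intro e
        have hx : x.1 ∉ t.map Prod.fst := (List.nodup_cons.1 (by simpa using h)).1
        exact hx (e ▸ List.mem_map_of_mem h1)
      have : (kv.1 == x.1) = false := beq_eq_false_iff_ne.2 hne
      simp only [pvLook, List.lookup, this]
      exact ih (List.nodup_cons.1 (by simpa using h)).2 h1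

theorem pvLook_map_of_mem {β γ : Type} (l : List (String × β)) (g : String × β → γ)
    (h : (l.map Prod.fst).Nodup) (kv : String × β) (hm : kv ∈ l) (d : γ) :
    pvLook (l.map (fun x => (x.1, g x))) kv.1 d = g kv := by
  have := pvLook_of_mem (l.map (fun x => (x.1, g x)))
    (by simpa [List.map_map, Function.comp] using h)
    (kv.1, g kv) (List.mem_map.2 ⟨kv, hm, rfl⟩) d
  simpa using this

theorem pvChunk_nil (bs : Int) (v : List (List Int)) : pvChunk bs v [] = [] := rfl
theorem pvChunk_singleton (bs : Int) (v : List (List Int)) (i : Int) :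
    pvChunk bs v [i] = pvTrim bs (PySem.List.pyGetD v i []) := by
  simp [pvChunk]
theorem pvChunk_append_singleton (bs : Int) (v : List (List Int)) (g : List Int) (i : Int) :
    pvChunk bs v (g ++ [i]) = pvChunk bs v g ++ pvTrim bs (PySem.List.pyGetD v i []) := by
  simp [pvChunk]

-- flushing the buffer dict into the result dict appends the current group
theorem flush_eq (bs : Int) (l : List (String × List (List Int))) (hnd : (l.map Prod.fst).Nodup)
    (G : List (List Int)) (C : List Int) :
    (l.map (fun kv => (kv.1, pvChunk bs kv.2 C))).map
      (fun kv => (kv.1, pvLook (l.map (fun kv => (kv.1, G.map (pvChunk bs kv.2)))) kv.1 [] ++ [kv.2]))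
    = l.map (fun kv => (kv.1, (G ++ [C]).map (pvChunk bs kv.2))) := by
  rw [List.map_map]
  refine List.map_congr_left (fun kv hkv => ?_)
  simp only [Function.comp]
  rw [pvLook_map_of_mem l (fun kv => G.map (pvChunk bs kv.2)) hnd kv hkv]
  simp

-- extending the buffer dict appends the trimmed row to the current group's chunk
theorem extend_eq (bs : Int) (l : List (String × List (List Int))) (hnd : (l.map Prod.fst).Nodup)
    (C : List Int) (ind : Int) :
    (l.map (fun kv => (kv.1, PySem.List.slice (PySem.List.pyGetD kv.2 ind []) (some 0) (some bs)))).map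
      (fun kv => (kv.1, pvLook (l.map (fun kv => (kv.1, pvChunk bs kv.2 C))) kv.1 [] ++ kv.2))
    = l.map (fun kv => (kv.1, pvChunk bs kv.2 (C ++ [ind]))) := by
  rw [List.map_map]
  refine List.map_congr_left (fun kv hkv => ?_)
  simp only [Function.comp]
  rw [pvLook_map_of_mem l (fun kv => pvChunk bs kv.2 C) hnd kv hkv]
  simp [pvChunk_append_singleton, pvTrim]

-- A's interleaved loop tracks exactly the image of the greedy grouping fold
theorem A_loop (bs : Int) (k0 : String) (v0 : List (List Int)) (rest : List (String × List (List Int)))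
    (hnd : (((k0, v0) :: rest).map Prod.fst).Nodup) (inds : List Int)
    (G : List (List Int)) (C : List Int) :
    inds.foldl
      (fun (st : List (String × List (List Int)) × List (String × List Int)) ind =>
        if ((pvLook st.2 k0 []).length : Int) + ((pvLook (((k0, v0) :: rest).map (fun kv => (kv.1, PySem.List.slice (PySem.List.pyGetD kv.2 ind []) (some 0) (some bs)))) k0 []).length : Int) > bs then
          (st.2.map (fun kv => (kv.1, pvLook st.1 kv.1 [] ++ [kv.2])),
           ((k0, v0) :: rest).map (fun kv => (kv.1, PySem.List.slice (PySem.List.pyGetD kv.2 ind []) (some 0) (some bs))))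
        else
          (st.1, (((k0, v0) :: rest).map (fun kv => (kv.1, PySem.List.slice (PySem.List.pyGetD kv.2 ind []) (some 0) (some bs)))).map (fun kv => (kv.1, pvLook st.2 kv.1 [] ++ kv.2))))
      (((k0, v0) :: rest).map (fun kv => (kv.1, G.map (pvChunk bs kv.2))),
       ((k0, v0) :: rest).map (fun kv => (kv.1, pvChunk bs kv.2 C)))
    = (((k0, v0) :: rest).map (fun kv => (kv.1, (inds.foldl (pvStep bs v0) (G, C)).1.map (pvChunk bs kv.2))),
       ((k0, v0) :: rest).map (fun kv => (kv.1, pvChunk bs kv.2 (inds.foldl (pvStep bs v0) (G, C)).2))) := by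
  induction inds generalizing G C with
  | nil => rfl
  | cons ind tl ih =>
    have hA : pvLook (((k0, v0) :: rest).map (fun kv => (kv.1, pvChunk bs kv.2 C))) k0 [] = pvChunk bs v0 C := by
      rw [List.map_cons]; exact pvLook_cons_self _ _ _ _
    have hE : pvLook (((k0, v0) :: rest).map (fun kv => (kv.1, PySem.List.slice (PySem.List.pyGetD kv.2 ind []) (some 0) (some bs)))) k0 []
        = PySem.List.slice (PySem.List.pyGetD v0 ind []) (some 0) (some bs) := by
      rw [List.map_cons]; exact pvLook_cons_self _ _ _ _
    simp only [List.foldl_cons]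
    rw [hA, hE]
    by_cases hc : ((pvChunk bs v0 C).length : Int) + ((PySem.List.slice (PySem.List.pyGetD v0 ind []) (some 0) (some bs)).length : Int) > bs
    · have hstep : pvStep bs v0 (G, C) ind = (G ++ [C], [ind]) := by
        simp only [pvStep, pvTrim]; rw [if_pos hc]
      rw [if_pos hc, hstep, flush_eq bs _ hnd G C,
        show ((k0, v0) :: rest).map (fun kv => (kv.1, PySem.List.slice (PySem.List.pyGetD kv.2 ind []) (some 0) (some bs)))
          = ((k0, v0) :: rest).map (fun kv => (kv.1, pvChunk bs kv.2 [ind])) from by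
            simp only [pvChunk_singleton, pvTrim]]
      exact ih (G ++ [C]) [ind]
    · have hstep : pvStep bs v0 (G, C) ind = (G, C ++ [ind]) := by
        simp only [pvStep, pvTrim]; rw [if_neg hc]
      rw [if_neg hc, hstep, extend_eq bs _ hnd C ind]
      exact ih G (C ++ [ind])

-- B's fold over (index, trimmed length) pairs is the greedy grouping fold plus the current length
theorem B_loop (bs : Int) (v0 : List (List Int)) (inds : List Int)
    (G : List (List Int)) (C : List Int) (s : Int)
    (hs : s = ((pvChunk bs v0 C).length : Int)) :
    (inds.map (fun i => (i, ((pvTrim bs (PySem.List.pyGetD v0 i [])).length : Int)))).foldl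
      (fun (st : List (List Int) × List Int × Int) il =>
        if st.2.2 + il.2 > bs then (st.1 ++ [st.2.1], [il.1], il.2)
        else (st.1, st.2.1 ++ [il.1], st.2.2 + il.2))
      (G, C, s)
    = ((inds.foldl (pvStep bs v0) (G, C)).1, (inds.foldl (pvStep bs v0) (G, C)).2,
       ((pvChunk bs v0 (inds.foldl (pvStep bs v0) (G, C)).2).length : Int)) := by
  induction inds generalizing G C s with
  | nil => simp [hs]
  | cons i tl ih =>
    simp only [List.map_cons, List.foldl_cons]
    by_cases hc : ((pvChunk bs v0 C).length : Int) + ((pvTrim bs (PySem.List.pyGetD v0 i [])).length : Int) > bs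
    · have hstep : pvStep bs v0 (G, C) i = (G ++ [C], [i]) := by simp [pvStep, hc]
      rw [hstep, show (if s + ((pvTrim bs (PySem.List.pyGetD v0 i [])).length : Int) > bs
            then (G ++ [C], [i], ((pvTrim bs (PySem.List.pyGetD v0 i [])).length : Int))
            else (G, C ++ [i], s + ((pvTrim bs (PySem.List.pyGetD v0 i [])).length : Int)))
          = (G ++ [C], [i], ((pvTrim bs (PySem.List.pyGetD v0 i [])).length : Int)) from by
            rw [if_pos (by rw [hs]; exact hc)]]
      exact ih _ _ _ (by rw [pvChunk_singleton])
    · have hstep : pvStep bs v0 (G, C) i = (G, C ++ [i]) := by simp [pvStep, hc]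
      rw [hstep, show (if s + ((pvTrim bs (PySem.List.pyGetD v0 i [])).length : Int) > bs
            then (G ++ [C], [i], ((pvTrim bs (PySem.List.pyGetD v0 i [])).length : Int))
            else (G, C ++ [i], s + ((pvTrim bs (PySem.List.pyGetD v0 i [])).length : Int)))
          = (G, C ++ [i], s + ((pvTrim bs (PySem.List.pyGetD v0 i [])).length : Int)) from by
            rw [if_neg (by rw [hs]; exact hc)]]
      exact ih _ _ _ (by rw [hs, pvChunk_append_singleton]; push_cast [List.length_append]; ring)

theorem range_mul (q bs : Int) (h : (0 < bs ∧ 0 ≤ q) ∨ (bs < 0 ∧ q ≤ 0)) :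
    PySem.List.pyRange 0 (q * bs) bs = (PySem.List.pyRange 0 q 1).map (fun j => j * bs) := by
  rcases h with ⟨hb, hq⟩ | ⟨hb, hq⟩
  · rw [PySem.List.pyRange_of_pos _ _ hb, PySem.List.pyRange_one, List.map_map]
    by_cases h0 : 0 < q
    · rw [if_pos (by positivity : (0:Int) < q * bs)]
      have hcount : ((q * bs - 0 + bs - 1) / bs).toNat = (q - 0).toNat := by
        have h1 : q * bs - 0 + bs - 1 = (bs - 1) + q * bs := by ring
        rw [h1, Int.add_mul_ediv_right _ _ (by omega : bs ≠ 0),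
          Int.ediv_eq_zero_of_lt (by omega) (by omega)]
        omega
      rw [hcount]
      exact List.map_congr_left (fun k _ => by simp [Function.comp]; ring)
    · have hq0 : q = 0 := le_antisymm (by omega) hq
      subst hq0
      simp
  · have h0 : (0 : Int) ≤ q * bs := by nlinarith
    have h2 : (q - 0).toNat = 0 := by omega
    rw [PySem.List.pyRange_one, h2]
    simp only [PySem.List.pyRange, if_neg (show bs ≠ 0 by omega), if_neg (not_lt.2 hb.le),
      if_neg (not_lt.2 h0), List.range_zero, List.map_nil]

-- ===== VERDICT (by name: the statement is the Claim_ definition above) =====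
theorem pack_examples_spec : Claim_equal_pack_examples := by
  intro examples bs pt _hDom hPre
  obtain ⟨hnd, hne, _hlen, hbs⟩ := hPre
  show pack_examples examples bs pt = pack_examples_alt examples bs pt
  by_cases hp : pt = "partial"
  · obtain ⟨⟨k0, v0⟩, rest, rfl⟩ : ∃ h t, examples = h :: t := by
      cases examples with
      | nil => exact absurd rfl (hne (Or.inl hp))
      | cons h t => exact ⟨h, t, rfl⟩
    have hkey : (((k0, v0) :: rest).map Prod.fst).headD "" = k0 := by simp
    have hprim : pvLook ((k0, v0) :: rest) k0 [] = v0 := pvLook_cons_self _ _ _ _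
    simp only [pack_examples, pack_examples_alt, if_pos hp, hkey, hprim]
    rw [show List.map (fun (kv : String × List (List Int)) => (kv.1, ([] : List (List Int)))) ((k0, v0) :: rest)
          = ((k0, v0) :: rest).map (fun kv => (kv.1, List.map (pvChunk bs kv.2) ([] : List (List Int)))) from by simp,
        show List.map (fun (kv : String × List (List Int)) => (kv.1, ([] : List Int))) ((k0, v0) :: rest)
          = ((k0, v0) :: rest).map (fun kv => (kv.1, pvChunk bs kv.2 ([] : List Int))) from by
            simp [pvChunk_nil],
        A_loop bs k0 v0 rest hnd (PySem.List.pyRange 0 (v0.length : Int) 1) [] []]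
    have henum : PySem.List.enumerate (v0.map (fun row => ((PySem.List.slice row (some 0) (some bs)).length : Int)))
        = (PySem.List.pyRange 0 (v0.length : Int) 1).map
            (fun j => (j, ((pvTrim bs (PySem.List.pyGetD v0 j [])).length : Int))) := by
      rw [PySem.List.enumerate_eq_map_pyRange _ (((PySem.List.slice ([] : List Int) (some 0) (some bs)).length : Int)),
        PySem.List.len_eq, List.length_map]
      refine List.map_congr_left (fun j hj => ?_)
      rw [PySem.List.pyGetD_map (fun row => ((PySem.List.slice row (some 0) (some bs)).length : Int)) v0 j ([] : List Int)]
      rfl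
    rw [henum, B_loop bs v0 (PySem.List.pyRange 0 (v0.length : Int) 1) [] [] 0 (by simp [pvChunk_nil])]
    have hC : ∀ C : List Int,
        pvLook (((k0, v0) :: rest).map (fun kv => (kv.1, pvChunk bs kv.2 C))) k0 [] = pvChunk bs v0 C :=
      fun C => by rw [List.map_cons]; exact pvLook_cons_self _ _ _ _
    simp only []
    rw [hC, flush_eq bs _ hnd]
    by_cases hf : ((pvChunk bs v0 ((PySem.List.pyRange 0 (v0.length : Int) 1).foldl (pvStep bs v0) ([], [])).2).length : Int) > 0
    · rw [if_pos hf, if_pos hf]; rfl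
    · rw [if_neg hf, if_neg hf]; rfl
  · by_cases hfu : pt = "full"
    · obtain ⟨⟨k0, v0⟩, rest, rfl⟩ : ∃ h t, examples = h :: t := by
        cases examples with
        | nil => exact absurd rfl (hne (Or.inr hfu))
        | cons h t => exact ⟨h, t, rfl⟩
      have hbs' : bs ≠ 0 := hbs hfu
      have hkey : (((k0, v0) :: rest).map Prod.fst).headD "" = k0 := by simp
      have hprim : pvLook ((k0, v0) :: rest) k0 [] = v0 := pvLook_cons_self _ _ _ _
      simp only [pack_examples, pack_examples_alt, if_neg hp, if_pos hfu, hkey, hprim]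
      rw [show (((k0, v0) :: rest).map Prod.fst).map
            (fun k => (k, (pvLook ((k0, v0) :: rest) k []).foldl (· ++ ·) []))
          = ((k0, v0) :: rest).map (fun kv => (kv.1, kv.2.foldl (· ++ ·) [])) from by
            rw [List.map_map]
            refine List.map_congr_left (fun kv hkv => ?_)
            simp only [Function.comp]
            rw [pvLook_of_mem _ hnd kv hkv],
        show pvLook (((k0, v0) :: rest).map (fun kv => (kv.1, kv.2.foldl (· ++ ·) []))) k0 []
          = v0.foldl (· ++ ·) [] from by
            rw [List.map_cons]; exact pvLook_cons_self _ _ _ _]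
      have hq : (0 < bs ∧ 0 ≤ PySem.Int.floordiv ((v0.foldl (· ++ ·) []).length : Int) bs) ∨
          (bs < 0 ∧ PySem.Int.floordiv ((v0.foldl (· ++ ·) []).length : Int) bs ≤ 0) := by
        simp only [PySem.Int.floordiv]
        rcases lt_or_gt_of_ne hbs' with h | h
        · right; exact ⟨h, Int.fdiv_nonpos_of_nonneg_of_nonpos (by positivity) h.le⟩
        · left; exact ⟨h, Int.fdiv_nonneg (by positivity) h.le⟩
      rw [range_mul _ bs hq, List.map_map]
      refine List.map_congr_left (fun kv _ => ?_)
      simp only [Function.comp, List.map_map]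
      refine congrArg _ ?_
      refine List.map_congr_left (fun j _ => ?_)
      rw [show (j + 1) * bs = j * bs + bs from by ring]
      rfl
    · simp only [pack_examples, pack_examples_alt, if_neg hp, if_neg hfu]
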